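-- pv_equiv track=rewrite | github.com/argrento/leetcode | 0036. Valid Sudoku/solution.py | check
-- ===== SOURCE A (Python) =====
-- from typing import List
--
-- def check(tokens: List[str]):
--     seen = set()
--     for token in tokens:
--         if token == '.':
--             continue
--         else:
--             if token not in seen:
--                 seen.add(token)
--             else:
--                 return False
--     return True
-- ===== SOURCE B (Python) =====
-- def check(tokens):
--     s = sorted(t for t in tokens if t != '.')
--     return all(a != b for a, b in zip(s, s[1:]))
-- ===== Notes on version B (the rewrite author's own statement) =====
-- stated objective: alternative
-- what changed: Replaces the single-pass membership scan with a mutated seen set by a sort-based duplicate test: sort the non-dot tokens and check that no two adjacent tokens of the sorted list are equal.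
import Mathlib
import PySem

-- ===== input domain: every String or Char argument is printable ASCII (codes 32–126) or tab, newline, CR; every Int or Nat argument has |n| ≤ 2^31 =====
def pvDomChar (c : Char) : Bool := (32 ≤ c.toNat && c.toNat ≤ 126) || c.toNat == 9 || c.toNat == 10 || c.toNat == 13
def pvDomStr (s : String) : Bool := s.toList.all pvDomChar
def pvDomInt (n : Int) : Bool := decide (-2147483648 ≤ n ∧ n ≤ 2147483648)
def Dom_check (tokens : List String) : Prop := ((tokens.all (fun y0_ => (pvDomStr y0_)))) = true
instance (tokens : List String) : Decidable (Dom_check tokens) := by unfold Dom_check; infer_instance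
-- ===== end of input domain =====

-- B replaces A's single-pass seen-set membership scan by a sort-based duplicate test:
-- sort the non-dot tokens and check no two adjacent sorted tokens are equal (objective: alternative).

-- ===== PORT A =====
-- the for-loop with its early 'return False', carrying the 'seen' set
def checkGo : List String → PySem.Set String → Bool
  | [], _ => true
  | token :: ts, seen =>
    if token == "." then checkGo ts seen
    else if PySem.Set.contains seen token then false
    else checkGo ts (PySem.Set.add seen token)

def check (tokens : List String) : Bool := checkGo tokens PySem.Set.empty

-- ===== PORT B =====
-- s = sorted(t for t in tokens if t != '.'); all(a != b for a, b in zip(s, s[1:]))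
def check_alt (tokens : List String) : Bool :=
  let s := PySem.List.sorted (tokens.filter (fun t => t != ".")) (fun x => x) false
  (s.zip (PySem.List.slice s (some 1) none)).all (fun p => p.1 != p.2)

-- ===== PRECONDITION & SPEC =====
def Spec_check (tokens : List String) (out : Bool) : Prop := out = check_alt tokens
instance (tokens : List String) (out : Bool) : Decidable (Spec_check tokens out) := by unfold Spec_check; infer_instance

-- ===== CLAIM (what is proved, stated in full; the proofs are below) =====
def Claim_equal_check : Prop := ∀ (tokens : List String), Dom_check tokens → Spec_check tokens (check tokens)

-- ===== LEMMAS AND PROOFS =====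

-- A's loop returns true iff the non-dot tokens are duplicate-free and disjoint from 'seen'
theorem checkGo_eq_true_iff (ts : List String) (seen : PySem.Set String) :
    checkGo ts seen = true ↔
      (ts.filter (fun t => t != ".")).Nodup ∧ ∀ x ∈ ts.filter (fun t => t != "."), x ∉ seen := by
  induction ts generalizing seen with
  | nil => simp [checkGo]
  | cons t ts ih =>
    by_cases ht : t = "."
    · subst ht
      simp [checkGo, ih]
    · have hb : (t == ".") = false := by simpa using ht
      simp only [checkGo, hb, List.filter_cons,
        show (t != ".") = true by simpa using ht, if_true]
      by_cases hs : t ∈ seen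
      · simp [hs]
      · have hcf : PySem.Set.contains seen t = false := by
          simpa [PySem.Set.contains] using hs
        simp only [hcf, Bool.false_eq_true, if_false, ih, List.nodup_cons, List.mem_cons]
        constructor
        · rintro ⟨hnd, hdisj⟩
          refine ⟨⟨fun hmem => hdisj t hmem (by simp [PySem.Set.mem_add]), hnd⟩, ?_⟩
          rintro x (rfl | hx)
          · exact hs
          · exact fun hxs => hdisj x hx (by simp [PySem.Set.mem_add, hxs])
        · rintro ⟨⟨htn, hnd⟩, hdisj⟩
          refine ⟨hnd, fun x hx hxadd => ?_⟩
          rcases (by simpa [PySem.Set.mem_add] using hxadd : x ∈ seen ∨ x = t) with hxs | rfl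
          · exact hdisj x (Or.inr hx) hxs
          · exact htn hx

-- for a ≤-sorted list, no-adjacent-duplicates (via zip with the tail) decides Nodup
theorem adj_all_ne_iff_nodup : ∀ (s : List String), s.Pairwise (fun a b => a ≤ b) →
    (((s.zip s.tail).all (fun p => p.1 != p.2)) = true ↔ s.Nodup) := by
  intro s
  induction s with
  | nil => simp
  | cons a s ih =>
    cases s with
    | nil => simp
    | cons b t =>
      intro hp
      rw [List.pairwise_cons] at hp
      obtain ⟨ha, hp'⟩ := hp
      have hrest := ih hp'
      simp only [List.tail_cons, List.zip_cons_cons, List.all_cons, Bool.and_eq_true,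
        bne_iff_ne, ne_eq] at hrest ⊢
      constructor
      · rintro ⟨hab, hr⟩
        refine List.nodup_cons.mpr ⟨?_, hrest.mp hr⟩
        intro hmem
        rcases List.mem_cons.mp hmem with rfl | hx
        · exact hab rfl
        · have hba : b ≤ a := (List.pairwise_cons.mp hp').1 a hx
          have hab' : a ≤ b := ha b (by simp)
          exact hab (le_antisymm hab' hba)
      · intro hnd
        rcases List.nodup_cons.mp hnd with ⟨hna, hnd'⟩
        exact ⟨fun h => hna (h ▸ List.mem_cons_self ..), hrest.mpr hnd'⟩

-- B returns true iff the filtered list is duplicate-free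
theorem check_alt_eq_true_iff (tokens : List String) :
    check_alt tokens = true ↔ (tokens.filter (fun t => t != ".")).Nodup := by
  have hdef : check_alt tokens =
      ((PySem.List.sorted (tokens.filter (fun t => t != ".")) (fun x => x) false).zip
        (PySem.List.slice (PySem.List.sorted (tokens.filter (fun t => t != ".")) (fun x => x) false)
          (some 1) none)).all (fun p => p.1 != p.2) := rfl
  have hperm : (PySem.List.sorted (tokens.filter (fun t => t != ".")) (fun x => x) false).Perm
      (tokens.filter (fun t => t != ".")) := PySem.List.sorted_perm ..
  have hpw : (PySem.List.sorted (tokens.filter (fun t => t != ".")) (fun x => x) false).Pairwise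
      (fun a b => a ≤ b) := by
    simpa using PySem.List.sorted_pairwise (xs := tokens.filter (fun t => t != ".")) (key := fun x => x)
  rw [hdef, PySem.List.slice_from_one, adj_all_ne_iff_nodup _ hpw]
  exact hperm.nodup_iff

-- ===== VERDICT (by name: the statement is the Claim_ definition above) =====
theorem check_spec : Claim_equal_check := by
  intro tokens _
  unfold Spec_check check
  rw [Bool.eq_iff_iff, checkGo_eq_true_iff, check_alt_eq_true_iff]
  simp [PySem.Set.empty]
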